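-- pv_equiv track=rewrite | github.com/Altera520/problem-solving | b_11399.py | minimum_result
-- ===== SOURCE A (Python) =====
-- def minimum_result(n, p):
--     ans = 0
--     tmp = [0 for _ in range(n + 1)]
--     p.sort()
--     for i in range(1, n + 1):
--         tmp[i] = tmp[i-1] + p[i]
--     for _ in tmp:
--         ans += _
--     return ans
-- ===== SOURCE B (Python) =====
-- def minimum_result(n, p):
--     # same in-place sort side effect as A; result computed as one weighted sum
--     p.sort()
--     return sum((n + 1 - i) * p[i] for i in range(1, n + 1))
-- ===== Notes on version B (the rewrite author's own statement) =====
-- stated objective: simpler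
-- what changed: Replaces A's prefix-sum table (build tmp[1..n], then sum the table in a second loop) with a single weighted sum ans = sum((n+1-i)*p[i]) over the sorted list, no auxiliary table.
import Mathlib
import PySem

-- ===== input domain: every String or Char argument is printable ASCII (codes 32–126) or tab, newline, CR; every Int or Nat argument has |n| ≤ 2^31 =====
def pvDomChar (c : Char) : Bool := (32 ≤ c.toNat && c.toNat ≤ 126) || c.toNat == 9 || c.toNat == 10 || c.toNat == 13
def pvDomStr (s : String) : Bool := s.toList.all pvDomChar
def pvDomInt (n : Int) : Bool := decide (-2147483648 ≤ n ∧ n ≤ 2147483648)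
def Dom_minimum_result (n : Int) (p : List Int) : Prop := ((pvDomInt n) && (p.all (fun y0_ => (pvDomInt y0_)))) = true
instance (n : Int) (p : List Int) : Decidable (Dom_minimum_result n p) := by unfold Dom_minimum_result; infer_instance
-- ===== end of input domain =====

-- B replaces A's prefix-sum table + second summing loop by one weighted sum over the sorted
-- list (objective: simpler). Both programs sort p in place; the equivalence proved here is
-- about the RETURN value (the mutation is identical in both).

-- ===== PORT A =====
def minimum_result (n : Int) (p : List Int) : Int :=
  let ans : Int := 0
  let tmp : List Int := (PySem.List.pyRange 0 (n + 1) 1).map (fun _ => (0 : Int))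
  let ps : List Int := PySem.List.sorted p (fun x => x) false
  let tmp2 : List Int := (PySem.List.pyRange 1 (n + 1) 1).foldl
    (fun tmp i =>
      PySem.List.pySetD tmp i (PySem.List.pyGetD tmp (i - 1) 0 + PySem.List.pyGetD ps i 0)) tmp
  tmp2.foldl (fun ans x => ans + x) ans

-- ===== PORT B =====
def minimum_result_alt (n : Int) (p : List Int) : Int :=
  let ps : List Int := PySem.List.sorted p (fun x => x) false
  ((PySem.List.pyRange 1 (n + 1) 1).map (fun i => (n + 1 - i) * PySem.List.pyGetD ps i 0)).sum

-- ===== PRECONDITION & SPEC =====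
-- Pre_ excludes exactly the inputs where A raises IndexError: for n ≥ 1 the loop reads p[i]
-- for i = 1..n, so the (sorted) list needs length > n. (B raises IndexError there too.)
def Pre_minimum_result (n : Int) (p : List Int) : Prop := 1 ≤ n → n < (p.length : Int)
instance (n : Int) (p : List Int) : Decidable (Pre_minimum_result n p) := by
  unfold Pre_minimum_result; infer_instance
def pvWitness_minimum_result : Int × List Int := (2, [3, 1, 2])

def Spec_minimum_result (n : Int) (p : List Int) (out : Int) : Prop := out = minimum_result_alt n p
instance (n : Int) (p : List Int) (out : Int) : Decidable (Spec_minimum_result n p out) := by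
  unfold Spec_minimum_result; infer_instance

-- ===== CLAIM (what is proved, stated in full; the proofs are below) =====
def Claim_equal_minimum_result : Prop := ∀ (n : Int) (p : List Int),
  Dom_minimum_result n p → Pre_minimum_result n p → Spec_minimum_result n p (minimum_result n p)

-- ===== LEMMAS AND PROOFS =====

-- prefix sum of the sorted list: pvS ps k = ps[1] + … + ps[k]
def pvS (ps : List Int) (k : Nat) : Int :=
  ((List.range k).map (fun i => ps.getD (i + 1) 0)).sum

-- the tmp table after the loop has processed i = 1 .. k (table length N+1)
def pvT (ps : List Int) (N k : Nat) : List Int :=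
  (List.range (N + 1)).map (fun j => if 1 ≤ j ∧ j ≤ k then pvS ps j else 0)

theorem pvS_succ (ps : List Int) (k : Nat) :
    pvS ps (k + 1) = pvS ps k + ps.getD (k + 1) 0 := by
  simp [pvS, List.sum_range_succ]

theorem pvT_length (ps : List Int) (N k : Nat) : (pvT ps N k).length = N + 1 := by
  simp [pvT]

theorem pvT_zero (ps : List Int) (N : Nat) : pvT ps N 0 = List.replicate (N + 1) 0 := by
  apply List.eq_replicate_iff.mpr
  refine ⟨by simp [pvT], ?_⟩
  intro b hb
  simp only [pvT, List.mem_map] at hb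
  obtain ⟨j, _, rfl⟩ := hb
  rw [if_neg (by omega : ¬ (1 ≤ j ∧ j ≤ 0))]

theorem pvT_getD (ps : List Int) (N k : Nat) (hk : k ≤ N) :
    (pvT ps N k).getD k 0 = pvS ps k := by
  have hlt : k < (pvT ps N k).length := by rw [pvT_length]; omega
  rw [List.getD_eq_getElem _ _ hlt]
  simp only [pvT, List.getElem_map, List.getElem_range]
  rcases Nat.eq_zero_or_pos k with h0 | h1
  · subst h0; simp [pvS]
  · have hc : 1 ≤ k ∧ k ≤ k := by omega
    rw [if_pos hc]

theorem pvT_step (ps : List Int) (N k : Nat) :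
    (pvT ps N k).set (k + 1) (pvS ps (k + 1)) = pvT ps N (k + 1) := by
  apply List.ext_getElem
  · simp [pvT]
  · intro j h1 h2
    rw [List.getElem_set]
    simp only [pvT, List.getElem_map, List.getElem_range]
    by_cases hj : k + 1 = j
    · subst hj
      have : 1 ≤ k + 1 ∧ k + 1 ≤ k + 1 := by omega
      simp [this]
    · have : (1 ≤ j ∧ j ≤ k) ↔ (1 ≤ j ∧ j ≤ k + 1) := by omega
      simp [hj, this]

-- A's main loop, run for i = 1 .. k, builds exactly the table pvT ps N k
theorem pvFold (ps : List Int) (N k : Nat) (hk : k ≤ N) :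
    (PySem.List.pyRange 1 ((k : Int) + 1) 1).foldl
      (fun tmp i =>
        PySem.List.pySetD tmp i (PySem.List.pyGetD tmp (i - 1) 0 + PySem.List.pyGetD ps i 0))
      (pvT ps N 0) = pvT ps N k := by
  induction k with
  | zero =>
    rw [PySem.List.pyRange_one_eq_nil (by norm_num)]
    rfl
  | succ k ih =>
    have hcast : ((k + 1 : Nat) : Int) + 1 = ((k : Int) + 1) + 1 := by push_cast; ring
    rw [hcast, PySem.List.pyRange_one_succ_right (by omega), List.foldl_append,
      ih (by omega)]
    simp only [List.foldl_cons, List.foldl_nil]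
    have hi1 : ((k : Int) + 1) - 1 = (k : Nat) := by omega
    have hi2 : ((k : Int) + 1) = ((k + 1 : Nat) : Int) := by push_cast; ring
    rw [hi1, hi2, PySem.List.pyGetD_natCast, PySem.List.pyGetD_natCast,
      PySem.List.pySetD_natCast, pvT_getD ps N k (by omega), ← pvS_succ, pvT_step ps N k]

-- the triangular re-summation: sum of prefix sums = weighted sum
theorem pvWeighted (ps : List Int) (k : Nat) :
    ((List.range k).map (fun j => pvS ps (j + 1))).sum
      = ((List.range k).map (fun i => ((k : Int) - i) * ps.getD (i + 1) 0)).sum := by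
  induction k with
  | zero => simp
  | succ N ih =>
    rw [List.sum_range_succ, ih, List.sum_range_succ, pvS_succ]
    have hsplit : ((List.range N).map (fun i => ((N : Int) + 1 - i) * ps.getD (i + 1) 0)).sum
        = ((List.range N).map (fun i => ((N : Int) - i) * ps.getD (i + 1) 0)).sum
          + ((List.range N).map (fun i => ps.getD (i + 1) 0)).sum := by
      rw [← PySem.List.sum_map_add_int]
      apply congrArg
      apply List.map_congr_left
      intro i _
      ring
    have hN1 : ((N + 1 : Nat) : Int) = (N : Int) + 1 := by push_cast; ring
    rw [hN1, hsplit]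
    have : pvS ps N = ((List.range N).map (fun i => ps.getD (i + 1) 0)).sum := rfl
    rw [this]
    ring

-- summing A's finished table = the weighted sum B computes
theorem pvSum (ps : List Int) (N : Nat) :
    (pvT ps N N).sum
      = ((List.range N).map (fun i => ((N : Int) - i) * ps.getD (i + 1) 0)).sum := by
  have hshift : (pvT ps N N).sum = ((List.range N).map (fun j => pvS ps (j + 1))).sum := by
    simp only [pvT]
    rw [List.sum_range_succ']
    have hc : ∀ j ∈ List.range N,
        (if 1 ≤ j + 1 ∧ j + 1 ≤ N then pvS ps (j + 1) else 0) = pvS ps (j + 1) := by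
      intro j hj
      rw [List.mem_range] at hj
      have : 1 ≤ j + 1 ∧ j + 1 ≤ N := by omega
      simp [this]
    rw [List.map_congr_left hc]
    simp
  rw [hshift, pvWeighted]

-- B's weighted sum, re-indexed over List.range
theorem pvB (ps : List Int) (N : Nat) :
    ((PySem.List.pyRange 1 ((N : Int) + 1) 1).map
        (fun i => ((N : Int) + 1 - i) * PySem.List.pyGetD ps i 0)).sum
      = ((List.range N).map (fun i => ((N : Int) - i) * ps.getD (i + 1) 0)).sum := by
  rw [PySem.List.pyRange_one]
  have h1 : (((N : Int) + 1) - 1).toNat = N := by omega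
  rw [h1, List.map_map]
  apply congrArg
  apply List.map_congr_left
  intro i _
  simp only [Function.comp]
  have h2 : (1 : Int) + (i : Nat) = ((i + 1 : Nat) : Int) := by push_cast; ring
  rw [h2, PySem.List.pyGetD_natCast]
  push_cast
  ring

-- the initial tmp table of A is pvT ps N 0
theorem pvInit (ps : List Int) (N : Nat) :
    (PySem.List.pyRange 0 ((N : Int) + 1) 1).map (fun _ => (0 : Int)) = pvT ps N 0 := by
  rw [pvT_zero, PySem.List.pyRange_one, List.map_map]
  have h1 : (((N : Int) + 1) - 0).toNat = N + 1 := by omega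
  rw [h1]
  simp [Function.comp_def]

-- ===== VERDICT (by name: the statement is the Claim_ definition above) =====
theorem minimum_result_spec : Claim_equal_minimum_result := by
  intro n p _ _
  unfold Spec_minimum_result
  simp only [minimum_result, minimum_result_alt]
  by_cases hn : n ≤ 0
  · -- both loops are empty; A sums a table of zeros
    rw [PySem.List.pyRange_one_eq_nil (a := 1) (b := n + 1) (by omega)]
    simp only [List.map_nil, List.sum_nil, List.foldl_nil]
    rw [PySem.List.foldl_add (g := fun x => x)]
    simp
  · obtain ⟨N, rfl⟩ : ∃ N : Nat, n = (N : Int) :=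
      ⟨n.toNat, (Int.toNat_of_nonneg (by omega)).symm⟩
    rw [pvB, pvInit (PySem.List.sorted p (fun x => x) false) N,
      pvFold (PySem.List.sorted p (fun x => x) false) N N (le_refl N),
      PySem.List.foldl_add (g := fun x => x)]
    simp only [List.map_id', zero_add]
    exact pvSum (PySem.List.sorted p (fun x => x) false) N
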